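-- pv_equiv track=rewrite | github.com/lmagni/Moonlighting | code/cluster_GO_correlation_matrix.py | batch_secondary
-- ===== SOURCE A (Python) =====
-- def batch_primary(entries, interactor_list):
--     primary_interactors = {entry : set() for entry in entries}
--     for (interactor_A, interactor_B) in interactor_list:
--         # do not append entry if it interacts with itself
--         if interactor_A in entries and interactor_A != interactor_B:
--             primary_interactors[interactor_A].add(interactor_B)
--         if interactor_B in entries and interactor_B != interactor_A:
--             primary_interactors[interactor_B].add(interactor_A)
--     return primary_interactors
--
-- def batch_secondary(entries, interactor_list):
--     primary_interactors = batch_primary(entries, interactor_list)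
--     all_primary = set()
--     for interactors in primary_interactors.values():
--         all_primary |= set(interactors)
--     all_secodary_interactors = batch_primary(all_primary, interactor_list)
--     secondary_interactors = {entry : {primary : all_secodary_interactors[primary] for primary in primary_interactors[entry]} for entry in entries}
--     return secondary_interactors
-- ===== SOURCE B (Python) =====
-- def batch_secondary(entries, interactor_list):
--     # one full adjacency table, built in a single pass over the edge list
--     adj = {}
--     for a, b in interactor_list:
--         if a != b:
--             adj.setdefault(a, set()).add(b)
--             adj.setdefault(b, set()).add(a)
--     # one row per distinct entry, in first-occurrence order; neighbors of an
--     # entry and of its primaries are both read off the same table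
--     result = {}
--     for entry in entries:
--         if entry not in result:
--             result[entry] = {p: adj.get(p, set()) for p in adj.get(entry, set())}
--     return result
-- ===== Notes on version B (the rewrite author's own statement) =====
-- stated objective: faster
-- what changed: B builds one full adjacency dict-of-sets in a single edge-list pass and then emits one row per first-seen entry by reading that table (a membership-guarded accumulation, no second batch_primary pass and no all_primary union), instead of A's two batch_primary passes that each test membership in the entries collection per edge.
import Mathlib
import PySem

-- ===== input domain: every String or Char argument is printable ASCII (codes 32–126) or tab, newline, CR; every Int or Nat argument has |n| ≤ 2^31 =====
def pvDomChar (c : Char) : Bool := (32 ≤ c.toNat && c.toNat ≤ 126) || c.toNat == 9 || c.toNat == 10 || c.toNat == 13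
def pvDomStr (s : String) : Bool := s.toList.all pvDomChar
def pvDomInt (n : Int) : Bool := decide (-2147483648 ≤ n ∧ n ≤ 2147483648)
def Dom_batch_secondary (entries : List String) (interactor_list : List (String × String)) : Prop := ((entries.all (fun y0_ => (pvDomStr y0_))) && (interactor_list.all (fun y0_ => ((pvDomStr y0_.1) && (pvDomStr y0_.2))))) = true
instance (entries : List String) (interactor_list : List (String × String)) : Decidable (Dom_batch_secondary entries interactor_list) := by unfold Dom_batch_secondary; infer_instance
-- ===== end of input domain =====

-- B replaces A's two batch_primary passes (each scanning `entries` per edge) and the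
-- all_primary union with ONE full adjacency table built in a single pass over the edge
-- list, then emits one row per first-seen entry by reading that table.

-- ===== PORT A =====
-- loop body of batch_primary's for-loop (the two guarded set.add mutations)
def primStep (entries : List String) (d : PySem.Dict String (PySem.Set String))
    (ab : String × String) : PySem.Dict String (PySem.Set String) :=
  -- primary_interactors[x].add(y): the key is always present when the guard holds
  -- (initialisation inserted every entry), so Dict.modify with default ∅ is exact here
  let d := if entries.contains ab.1 && ab.1 != ab.2 then
      d.modify ab.1 PySem.Set.empty (fun s => PySem.Set.add s ab.2) else d
  if entries.contains ab.2 && ab.2 != ab.1 then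
      d.modify ab.2 PySem.Set.empty (fun s => PySem.Set.add s ab.1) else d

def batch_primary (entries : List String) (interactor_list : List (String × String)) :
    PySem.Dict String (PySem.Set String) :=
  interactor_list.foldl (primStep entries)
    (entries.foldl (fun d e => d.insert e PySem.Set.empty) PySem.Dict.empty)

def batch_secondary (entries : List String) (interactor_list : List (String × String)) :
    List (String × List (String × List String)) :=
  let primary_interactors := batch_primary entries interactor_list
  let all_primary := primary_interactors.values.foldl
    (fun s i => PySem.Set.union s i) PySem.Set.empty
  let all_sec := batch_primary all_primary interactor_list
  -- all_secodary_interactors[primary]: the key is always present (primary ∈ all_primary),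
  -- so getD ∅ is exact here
  (entries.foldl (fun out e =>
      out.insert e ((primary_interactors.getD e PySem.Set.empty).foldl
        (fun inner p => inner.insert p (all_sec.getD p PySem.Set.empty)) PySem.Dict.empty))
    (PySem.Dict.empty : PySem.Dict String (PySem.Dict String (PySem.Set String)))).items.map
    (fun kv => (kv.1, kv.2.items))

-- ===== PORT B =====
-- B's single adjacency-building pass over the edge list, written recursively;
-- adj.setdefault(x, set()).add(y) mutates the stored set = Dict.modify with default ∅
def buildAdj : List (String × String) → PySem.Dict String (PySem.Set String) →
    PySem.Dict String (PySem.Set String)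
  | [], d => d
  | (a, b) :: rest, d =>
      buildAdj rest (if a != b then
        (d.modify a PySem.Set.empty (fun s => PySem.Set.add s b)).modify b
          PySem.Set.empty (fun s => PySem.Set.add s a)
      else d)

-- B's result loop: `if entry not in result: result[entry] = {…}`; a Dict IS its items
-- list and every inserted key is fresh (appends), so the rows are accumulated directly.
-- The inner dict comprehension runs over a set (distinct keys, so the dict in insertion
-- order is exactly this map).
def buildRows (adj : PySem.Dict String (PySem.Set String)) :
    List String → List (String × List (String × List String)) →
    List (String × List (String × List String))
  | [], acc => acc
  | e :: rest, acc =>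
      buildRows adj rest (if (acc.map Prod.fst).contains e then acc
        else acc ++ [(e, (adj.getD e PySem.Set.empty).map
          (fun p => (p, adj.getD p PySem.Set.empty)))])

def batch_secondary_alt (entries : List String) (interactor_list : List (String × String)) :
    List (String × List (String × List String)) :=
  buildRows (buildAdj interactor_list PySem.Dict.empty) entries []

-- ===== PRECONDITION & SPEC =====
def Spec_batch_secondary (entries : List String) (interactor_list : List (String × String)) (out : List (String × List (String × List String))) : Prop := out = batch_secondary_alt entries interactor_list
instance (entries : List String) (interactor_list : List (String × String)) (out : List (String × List (String × List String))) : Decidable (Spec_batch_secondary entries interactor_list out) := by unfold Spec_batch_secondary; infer_instance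

-- ===== CLAIM (what is proved, stated in full; the proofs are below) =====
def Claim_equal_batch_secondary : Prop := ∀ (entries : List String) (interactor_list : List (String × String)), Dom_batch_secondary entries interactor_list → Spec_batch_secondary entries interactor_list (batch_secondary entries interactor_list)

-- ===== LEMMAS AND PROOFS =====

-- proof-side name for buildAdj's loop body
def adjStep (d : PySem.Dict String (PySem.Set String)) (ab : String × String) :
    PySem.Dict String (PySem.Set String) :=
  if ab.1 != ab.2 then
    (d.modify ab.1 PySem.Set.empty (fun s => PySem.Set.add s ab.2)).modify ab.2
      PySem.Set.empty (fun s => PySem.Set.add s ab.1)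
  else d

lemma buildAdj_eq_foldl (il : List (String × String)) :
    ∀ d, buildAdj il d = il.foldl adjStep d := by
  induction il with
  | nil => intro d; rfl
  | cons ab tl ih => intro d; obtain ⟨a, b⟩ := ab; simp [buildAdj, adjStep, ih]

-- the initial dict {entry: set() for entry in entries} looks up to ∅ at every key
lemma getD_foldl_insert_empty (E : List String) (k : String) :
    ∀ d : PySem.Dict String (PySem.Set String),
      d.getD k PySem.Set.empty = PySem.Set.empty →
      (E.foldl (fun d e => d.insert e PySem.Set.empty) d).getD k PySem.Set.empty
        = PySem.Set.empty := by
  induction E with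
  | nil => intro d h; simpa using h
  | cons e tl ih =>
    intro d h
    refine ih _ ?_
    rw [PySem.Dict.getD_insert]
    split <;> simp_all [PySem.Set.empty]

-- one edge moves the tracked set at key k the same way in both loops
lemma step_getD (E : List String) (k : String) (hk : k ∈ E) (ab : String × String)
    (d1 d2 : PySem.Dict String (PySem.Set String))
    (h : d1.getD k PySem.Set.empty = d2.getD k PySem.Set.empty) :
    (primStep E d1 ab).getD k PySem.Set.empty
      = (adjStep d2 ab).getD k PySem.Set.empty := by
  obtain ⟨a, b⟩ := ab
  by_cases hab : a = b
  · subst hab; simp_all [primStep, adjStep, PySem.Set.empty]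
  · by_cases hka : k = a <;> by_cases hkb : k = b <;>
      by_cases haE : a ∈ E <;> by_cases hbE : b ∈ E <;>
      simp_all [primStep, adjStep, PySem.Dict.getD_modify, PySem.Set.empty,
        Ne.symm hab]

-- the two loops keep the same set at every key that batch_primary tracks
lemma fold_getD_eq (E : List String) (il : List (String × String)) (k : String)
    (hk : k ∈ E) :
    ∀ d1 d2 : PySem.Dict String (PySem.Set String),
      d1.getD k PySem.Set.empty = d2.getD k PySem.Set.empty →
      (il.foldl (primStep E) d1).getD k PySem.Set.empty
        = (il.foldl adjStep d2).getD k PySem.Set.empty := by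
  induction il with
  | nil => intro d1 d2 h; simpa using h
  | cons ab tl ih =>
    intro d1 d2 h
    exact ih _ _ (step_getD E k hk ab d1 d2 h)

-- batch_primary's set at a tracked key equals B's adjacency set there
lemma prim_getD (E : List String) (il : List (String × String)) (k : String)
    (hk : k ∈ E) :
    (batch_primary E il).getD k PySem.Set.empty
      = (buildAdj il PySem.Dict.empty).getD k PySem.Set.empty := by
  unfold batch_primary
  rw [buildAdj_eq_foldl]
  exact fold_getD_eq E il k hk _ _
    (by rw [getD_foldl_insert_empty E k PySem.Dict.empty (by simp [PySem.Dict.getD_empty]),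
            PySem.Dict.getD_empty])

lemma mem_foldl_union {p : String} (vs : List (PySem.Set String)) :
    ∀ s : PySem.Set String, (p ∈ s ∨ ∃ v ∈ vs, p ∈ v) →
      p ∈ vs.foldl (fun s i => PySem.Set.union s i) s := by
  induction vs with
  | nil => intro s h; simpa using h.resolve_right (by simp)
  | cons v tl ih =>
    intro s h
    apply ih
    rcases h with h | ⟨w, hw, hpw⟩
    · left; rw [PySem.Set.mem_union]; exact Or.inl h
    · rcases List.mem_cons.mp hw with rfl | hw
      · left; rw [PySem.Set.mem_union]; exact Or.inr hpw
      · exact Or.inr ⟨w, hw, hpw⟩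

-- every element of some value-set is in the all_primary union
lemma mem_all_primary {p e : String} (d : PySem.Dict String (PySem.Set String))
    (hp : p ∈ d.getD e PySem.Set.empty) :
    p ∈ d.values.foldl (fun s i => PySem.Set.union s i) PySem.Set.empty := by
  rw [PySem.Dict.getD_eq_get?_getD] at hp
  cases hv : d.get? e with
  | none => rw [hv] at hp; simp [Option.getD, PySem.Set.empty] at hp
  | some v =>
    rw [hv] at hp
    have hvv : v ∈ d.values := by
      have hm := PySem.Dict.mem_items_of_get?_eq_some d hv
      unfold PySem.Dict.values
      exact List.mem_map.mpr ⟨(e, v), hm, rfl⟩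
    exact mem_foldl_union _ _ (Or.inr ⟨v, hvv, hp⟩)

-- a fold of inserts leaves keys outside the loop untouched
lemma getD_foldl_insert_not_mem {V : Type} (F : String -> V) (dflt : V)
    (l : List String) (k : String) (hk : k ∉ l) :
    ∀ d : PySem.Dict String V,
      (l.foldl (fun d e => d.insert e (F e)) d).getD k dflt = d.getD k dflt := by
  induction l with
  | nil => intro d; rfl
  | cons a tl ih =>
    intro d
    have hka : k ≠ a := fun h => hk (h ▸ List.mem_cons_self)
    rw [List.foldl_cons, ih (fun h => hk (List.mem_cons_of_mem _ h)),
        PySem.Dict.getD_insert_of_ne _ _ _ hka]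

-- a fold of inserts whose value depends only on the key stores F k at every looped key
lemma getD_foldl_insert_const {V : Type} (F : String -> V) (dflt : V)
    (l : List String) (k : String) (hk : k ∈ l) :
    ∀ d : PySem.Dict String V,
      (l.foldl (fun d e => d.insert e (F e)) d).getD k dflt = F k := by
  induction l with
  | nil => cases hk
  | cons a tl ih =>
    intro d
    by_cases hkt : k ∈ tl
    · exact ih hkt _
    · have hka : k = a := by rcases List.mem_cons.mp hk with h | h; exact h; exact absurd h hkt
      subst hka
      rw [List.foldl_cons, getD_foldl_insert_not_mem F dflt tl k hkt,
          PySem.Dict.getD_insert_self]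

-- every set stored in B's adjacency table has distinct elements
lemma adj_getD_nodup (il : List (String × String)) (k : String) :
    ∀ d : PySem.Dict String (PySem.Set String),
      (∀ j, (d.getD j PySem.Set.empty).Nodup) →
      ((il.foldl adjStep d).getD k PySem.Set.empty).Nodup := by
  induction il with
  | nil => intro d h; exact h k
  | cons ab tl ih =>
    intro d h
    refine ih _ (fun j => ?_)
    obtain ⟨a, b⟩ := ab
    by_cases hab : a = b
    · simpa [adjStep, hab] using h j
    · simp only [adjStep, bne_iff_ne, ne_eq, hab, not_false_iff, if_true,
        PySem.Dict.getD_modify]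
      split_ifs with h1 h2 h3
      · exact PySem.Set.nodup_add _ _ (PySem.Set.nodup_add _ _ (h a))
      · exact PySem.Set.nodup_add _ _ (h b)
      · exact PySem.Set.nodup_add _ _ (h a)
      · exact h j

-- B's row loop, started from the rows of a set s, produces the rows of s updated by l
lemma buildRows_spec (adj : PySem.Dict String (PySem.Set String))
    (row : String -> List (String × List String))
    (hrow : ∀ e, row e = (adj.getD e PySem.Set.empty).map
      (fun p => (p, adj.getD p PySem.Set.empty)))
    (l : List String) :
    ∀ s : PySem.Set String,
      buildRows adj l (s.map (fun e => (e, row e)))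
        = (PySem.Set.update s l).map (fun e => (e, row e)) := by
  induction l with
  | nil => intro s; simp [buildRows, PySem.Set.update]
  | cons e tl ih =>
    intro s
    have hmap : (s.map (fun e => (e, row e))).map Prod.fst = s := by
      simp [Function.comp_def]
    rw [buildRows, hmap]
    by_cases hes : e ∈ s
    · rw [if_pos (by simpa [List.contains_iff_mem] using hes)]
      have : PySem.Set.update s (e :: tl) = PySem.Set.update (PySem.Set.add s e) tl := by
        simp [PySem.Set.update]
      rw [this, PySem.Set.add_of_mem hes]
      exact ih s
    · rw [if_neg (by simpa [List.contains_iff_mem] using hes)]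
      have h1 : s.map (fun e => (e, row e)) ++ [(e, (adj.getD e PySem.Set.empty).map
          (fun p => (p, adj.getD p PySem.Set.empty)))]
          = (s ++ [e]).map (fun e => (e, row e)) := by
        simp [hrow e]
      have h2 : PySem.Set.update s (e :: tl) = PySem.Set.update (s ++ [e]) tl := by
        simp [PySem.Set.update, PySem.Set.add_of_not_mem hes]
      rw [h1, h2]
      exact ih (s ++ [e])

-- ===== VERDICT (by name: the statement is the Claim_ definition above) =====
theorem batch_secondary_spec : Claim_equal_batch_secondary := by
  intro entries il _
  unfold Spec_batch_secondary batch_secondary batch_secondary_alt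
  dsimp only
  set adj := buildAdj il PySem.Dict.empty with hadj
  set prim := batch_primary entries il with hprim
  set allsec := batch_primary (prim.values.foldl
    (fun s i => PySem.Set.union s i) PySem.Set.empty) il with hallsec
  set row : String -> List (String × List String) := fun e =>
    (adj.getD e PySem.Set.empty).map (fun p => (p, adj.getD p PySem.Set.empty)) with hrowdef
  -- the inner dict built by A at an entry e ∈ entries has exactly row e as its items
  have hinner : ∀ e ∈ entries,
      ((prim.getD e PySem.Set.empty).foldl
        (fun inner p => inner.insert p (allsec.getD p PySem.Set.empty))
        PySem.Dict.empty).items = row e := by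
    intro e he
    have hset : prim.getD e PySem.Set.empty = adj.getD e PySem.Set.empty := by
      rw [hprim, hadj]; exact prim_getD entries il e he
    have hnd : (adj.getD e PySem.Set.empty).Nodup := by
      rw [hadj, buildAdj_eq_foldl]
      exact adj_getD_nodup il e PySem.Dict.empty
        (fun j => by simp [PySem.Dict.getD_empty, PySem.Set.empty])
    rw [hset, PySem.Dict.items_foldl_insert_fresh (adj.getD e PySem.Set.empty)
      (fun p => p) (fun p => allsec.getD p PySem.Set.empty) PySem.Dict.empty
      (fun a _ => PySem.Dict.contains_empty a) (by simpa using hnd)]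
    simp only [hrowdef]
    rw [show (PySem.Dict.empty : PySem.Dict String (PySem.Set String)).items = [] from rfl,
      List.nil_append]
    apply List.map_congr_left
    intro p hp
    have hsec : allsec.getD p PySem.Set.empty = adj.getD p PySem.Set.empty := by
      rw [hallsec, hadj]
      refine prim_getD _ il p ?_
      exact mem_all_primary prim (by rw [hset]; exact hp)
    rw [hsec]
  -- A's outer dict: keys are the distinct entries, values the inner dicts
  have hkeys : (entries.foldl (fun out e =>
      out.insert e ((prim.getD e PySem.Set.empty).foldl
        (fun inner p => inner.insert p (allsec.getD p PySem.Set.empty)) PySem.Dict.empty))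
      (PySem.Dict.empty : PySem.Dict String (PySem.Dict String (PySem.Set String)))).keys
      = PySem.Set.ofList entries := by
    rw [PySem.Dict.keys_foldl_insert]
    simp [PySem.Set.update, PySem.Set.ofList_eq_foldl, PySem.Dict.keys_empty]
  have hknd : (PySem.Set.ofList entries).Nodup := PySem.Set.nodup_ofList entries
  rw [PySem.Dict.items_eq_map_keys _ (by rw [hkeys]; exact hknd) PySem.Dict.empty, hkeys]
  rw [show ([] : List (String × List (String × List String)))
      = (PySem.Set.empty : PySem.Set String).map (fun e => (e, row e)) by rfl,
    buildRows_spec adj row (fun _ => rfl) entries PySem.Set.empty]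
  have hupd : PySem.Set.update PySem.Set.empty entries = PySem.Set.ofList entries := by
    simp [PySem.Set.update, PySem.Set.ofList_eq_foldl, PySem.Set.empty]
  rw [hupd, List.map_map]
  apply List.map_congr_left
  intro e he
  have he' : e ∈ entries := (PySem.Set.mem_ofList _ _).mp he
  simp only [Function.comp]
  rw [getD_foldl_insert_const _ _ entries e he', hinner e he']
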